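-- pv_equiv track=rewrite | github.com/ImxYJL/coding-test | 백준/Silver/4659. 비밀번호 발음하기/비밀번호 발음하기.py | check_second_condition
-- ===== SOURCE A (Python) =====
-- def is_vowel(ch):
--     vowels = "aeiou"
--     return ch in vowels
--
-- def check_second_condition(pwd):
--     if len(pwd) < 3:
--         return True
--
--     vowel_count = 0
--     consonant_count = 0
--
--     for index in range(3):
--         if is_vowel(pwd[index]):
--             vowel_count += 1
--         else:
--             consonant_count += 1
--
--     if vowel_count >= 3 or consonant_count >= 3:
--         return False
--
--     for index in range(3, len(pwd)):
--         if is_vowel(pwd[index]):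
--             vowel_count += 1
--         else:
--             consonant_count += 1
--
--         if is_vowel(pwd[index - 3]):
--             vowel_count -= 1
--         else:
--             consonant_count -= 1
--
--         if vowel_count >= 3 or consonant_count >= 3:
--             return False
--
--     return True
-- ===== SOURCE B (Python) =====
-- def is_vowel(ch):
--     vowels = "aeiou"
--     return ch in vowels
--
-- def check_second_condition(pwd):
--     kinds = [is_vowel(ch) for ch in pwd]
--     return all(not (kinds[i] == kinds[i + 1] == kinds[i + 2])
--                for i in range(len(kinds) - 2))
-- ===== Notes on version B (the rewrite author's own statement) =====
-- stated objective: simpler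
-- what changed: Replaced the stateful sliding-window vowel/consonant counters and the separate len<3 guard with a stateless check: precompute each character's class once, then test every 3-window directly for three equal classes.
import Mathlib
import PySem

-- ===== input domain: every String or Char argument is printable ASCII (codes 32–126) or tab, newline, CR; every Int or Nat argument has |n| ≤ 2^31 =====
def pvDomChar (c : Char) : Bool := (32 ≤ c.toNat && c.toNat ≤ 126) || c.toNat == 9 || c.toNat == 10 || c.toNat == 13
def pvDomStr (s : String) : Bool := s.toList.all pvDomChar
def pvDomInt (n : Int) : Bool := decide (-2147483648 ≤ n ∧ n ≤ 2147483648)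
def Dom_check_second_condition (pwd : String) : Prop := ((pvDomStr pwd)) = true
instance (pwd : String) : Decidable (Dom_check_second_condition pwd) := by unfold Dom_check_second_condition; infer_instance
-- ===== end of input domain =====

-- B drops A's running vowel/consonant counters and len<3 guard: it classifies each
-- character once and checks every 3-window statelessly (simpler; same O(n) cost).

-- ===== PORT A =====
def is_vowel (ch : Char) : Bool := "aeiou".toList.contains ch

-- second loop of A: indices 3..len-1, early return modeled by returning false
def loopA (l : List Char) : List Nat → Int → Int → Bool
  | [], _, _ => true
  | i :: rest, vc, cc =>
    let vc1 := if is_vowel (l.getD i ' ') then vc + 1 else vc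
    let cc1 := if is_vowel (l.getD i ' ') then cc else cc + 1
    let vc2 := if is_vowel (l.getD (i - 3) ' ') then vc1 - 1 else vc1
    let cc2 := if is_vowel (l.getD (i - 3) ' ') then cc1 else cc1 - 1
    if 3 ≤ vc2 || 3 ≤ cc2 then false else loopA l rest vc2 cc2

def check_second_condition (pwd : String) : Bool :=
  let l := pwd.toList
  if l.length < 3 then true
  else
    let p := (List.range 3).foldl
      (fun (p : Int × Int) i =>
        if is_vowel (l.getD i ' ') then (p.1 + 1, p.2) else (p.1, p.2 + 1)) (0, 0)
    if 3 ≤ p.1 || 3 ≤ p.2 then false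
    else loopA l (List.range' 3 (l.length - 3)) p.1 p.2

-- ===== PORT B =====
def check_second_condition_alt (pwd : String) : Bool :=
  let kinds := pwd.toList.map is_vowel
  (List.range (kinds.length - 2)).all fun i =>
    ! (kinds.getD i false == kinds.getD (i + 1) false
        && kinds.getD (i + 1) false == kinds.getD (i + 2) false)

-- ===== PRECONDITION & SPEC =====
def Spec_check_second_condition (pwd : String) (out : Bool) : Prop := out = check_second_condition_alt pwd
instance (pwd : String) (out : Bool) : Decidable (Spec_check_second_condition pwd out) := by unfold Spec_check_second_condition; infer_instance

-- ===== CLAIM (what is proved, stated in full; the proofs are below) =====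
def Claim_equal_check_second_condition : Prop := ∀ (pwd : String), Dom_check_second_condition pwd → Spec_check_second_condition pwd (check_second_condition pwd)

-- ===== LEMMAS AND PROOFS =====

lemma all_congr_mem {α : Type} (p q : α → Bool) :
    ∀ (l : List α), (∀ a ∈ l, p a = q a) → l.all p = l.all q := by
  intro l h
  induction l with
  | nil => rfl
  | cons x t ih =>
    simp only [List.all_cons, h x (List.mem_cons_self), ih fun a ha => h a (List.mem_cons_of_mem _ ha)]

def b2i (x : Bool) : Int := if x then 1 else 0

-- the class of l[j]
def Kf (l : List Char) (j : Nat) : Bool := is_vowel (l.getD j ' ')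

def winOK (l : List Char) (j : Nat) : Bool :=
  ! (Kf l j == Kf l (j + 1) && Kf l (j + 1) == Kf l (j + 2))

lemma loopA_eq (l : List Char) (m : Nat) :
    ∀ (i : Nat) (a b c : Bool), 3 ≤ i →
      a = Kf l (i - 3) → b = Kf l (i - 2) → c = Kf l (i - 1) →
      loopA l (List.range' i m) (b2i a + b2i b + b2i c) (3 - (b2i a + b2i b + b2i c))
        = (List.range' (i - 2) m).all (winOK l) := by
  induction m with
  | zero => intro i a b c _ _ _ _; simp [loopA]
  | succ m ih =>
    intro i a b c h3 ha hb hc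
    rw [List.range'_succ, List.range'_succ]
    simp only [loopA, List.all_cons]
    have hKi : is_vowel (l.getD (i - 3) ' ') = a := ha.symm
    have hKc : is_vowel (l.getD i ' ') = Kf l i := rfl
    rw [hKi, hKc]
    have hwin : winOK l (i - 2) = ! (b == c && c == Kf l i) := by
      simp only [winOK]
      rw [show i - 2 + 1 = i - 1 from by omega, show i - 2 + 2 = i from by omega,
        ← hb, ← hc]
    by_cases hw : (b == c && c == Kf l i) = true
    · -- bad window: counter condition fires; both sides false
      have hcond : (3 ≤ (if a = true
            then (if Kf l i = true then b2i a + b2i b + b2i c + 1 else b2i a + b2i b + b2i c) - 1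
            else (if Kf l i = true then b2i a + b2i b + b2i c + 1 else b2i a + b2i b + b2i c))
          || 3 ≤ (if a = true
            then (if Kf l i = true then 3 - (b2i a + b2i b + b2i c) else 3 - (b2i a + b2i b + b2i c) + 1)
            else (if Kf l i = true then 3 - (b2i a + b2i b + b2i c) else 3 - (b2i a + b2i b + b2i c) + 1) - 1)) = true := by
        revert hw
        cases a <;> cases b <;> cases c <;> cases Kf l i <;> decide
      rw [hcond]
      simp [hwin, hw]
    · -- good window: counter condition does not fire; recurse
      have hcond : (3 ≤ (if a = true
            then (if Kf l i = true then b2i a + b2i b + b2i c + 1 else b2i a + b2i b + b2i c) - 1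
            else (if Kf l i = true then b2i a + b2i b + b2i c + 1 else b2i a + b2i b + b2i c))
          || 3 ≤ (if a = true
            then (if Kf l i = true then 3 - (b2i a + b2i b + b2i c) else 3 - (b2i a + b2i b + b2i c) + 1)
            else (if Kf l i = true then 3 - (b2i a + b2i b + b2i c) else 3 - (b2i a + b2i b + b2i c) + 1) - 1)) = false := by
        revert hw
        cases a <;> cases b <;> cases c <;> cases Kf l i <;> decide
      rw [hcond]
      have hvc2 : (if a = true
            then (if Kf l i = true then b2i a + b2i b + b2i c + 1 else b2i a + b2i b + b2i c) - 1
            else (if Kf l i = true then b2i a + b2i b + b2i c + 1 else b2i a + b2i b + b2i c))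
          = b2i b + b2i c + b2i (Kf l i) := by
        cases a <;> cases b <;> cases c <;> cases Kf l i <;> decide
      have hcc2 : (if a = true
            then (if Kf l i = true then 3 - (b2i a + b2i b + b2i c) else 3 - (b2i a + b2i b + b2i c) + 1)
            else (if Kf l i = true then 3 - (b2i a + b2i b + b2i c) else 3 - (b2i a + b2i b + b2i c) + 1) - 1)
          = 3 - (b2i b + b2i c + b2i (Kf l i)) := by
        cases a <;> cases b <;> cases c <;> cases Kf l i <;> decide
      rw [hvc2, hcc2]
      have hrec := ih (i + 1) b c (Kf l i) (by omega)
        (by rw [show i + 1 - 3 = i - 2 from by omega, hb])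
        (by rw [show i + 1 - 2 = i - 1 from by omega, hc])
        (by rw [show i + 1 - 1 = i from by omega])
      rw [hrec, show i + 1 - 2 = i - 1 from by omega,
        show i - 2 + 1 = i - 1 from by omega]
      simp [hwin, hw]

lemma getD_map_eq (l : List Char) (j : Nat) (h : j < l.length) :
    (l.map is_vowel).getD j false = Kf l j := by
  simp [List.getD, h, Kf]

-- ===== VERDICT (by name: the statement is the Claim_ definition above) =====
theorem check_second_condition_spec : Claim_equal_check_second_condition := by
  intro pwd _
  unfold Spec_check_second_condition check_second_condition check_second_condition_alt
  simp only []
  set l := pwd.toList with hl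
  by_cases hlen : l.length < 3
  · rw [if_pos hlen]
    have hz : (l.map is_vowel).length - 2 = 0 := by simp; omega
    rw [hz]
    simp
  · rw [if_neg hlen]
    rw [Nat.not_lt] at hlen
    -- the initial fold over range(3)
    rw [show List.range 3 = [0, 1, 2] from by decide]
    simp only [List.foldl]
    -- B's all as an all of winOK over range' 0 (len-2)
    have hBlen : (l.map is_vowel).length = l.length := by simp
    have hB : (List.range ((l.map is_vowel).length - 2)).all
        (fun i => ! ((l.map is_vowel).getD i false == (l.map is_vowel).getD (i + 1) false
          && (l.map is_vowel).getD (i + 1) false == (l.map is_vowel).getD (i + 2) false))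
        = (List.range' 0 (l.length - 2)).all (winOK l) := by
      rw [List.range_eq_range', hBlen]
      apply all_congr_mem
      intro i hi
      have hi' : i < l.length - 2 := by
        have := List.mem_range'.mp hi; omega
      rw [getD_map_eq l i (by omega), getD_map_eq l (i + 1) (by omega),
        getD_map_eq l (i + 2) (by omega)]
      rfl
    rw [hB, show l.length - 2 = (l.length - 3) + 1 from by omega, List.range'_succ,
      List.all_cons]
    have hK0 : is_vowel (l.getD 0 ' ') = Kf l 0 := rfl
    have hK1 : is_vowel (l.getD 1 ' ') = Kf l 1 := rfl
    have hK2 : is_vowel (l.getD 2 ' ') = Kf l 2 := rfl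
    rw [hK0, hK1, hK2]
    have hwin0 : winOK l 0 = ! (Kf l 0 == Kf l 1 && Kf l 1 == Kf l 2) := rfl
    have hloop := loopA_eq l (l.length - 3) 3 (Kf l 0) (Kf l 1) (Kf l 2)
      (le_refl 3) rfl rfl rfl
    norm_num at hloop
    rw [hwin0]
    cases hc0 : Kf l 0 <;> cases hc1 : Kf l 1 <;> cases hc2 : Kf l 2 <;>
      rw [hc0, hc1, hc2] at hloop <;> simp_all [b2i]
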